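-- pv_equiv track=rewrite | github.com/mouradtounsi2357/graphing_calculator | Erreur_expression_mathematique.py | var_constante_dvdr
-- ===== SOURCE A (Python) =====
-- def var_constante_dvdr(s,c1,c2):
--     sym_dr=['+','-','*','/','^','(']
--     for i in range(0,len(s)-2,1):
--         for j in range(0,len(c1),1):
--             if (s[i+1],s[i+2]) == (c1[j][0],c1[j][1]):
--                 var_bool=False
--                 for k in range(0,len(sym_dr),1):
--                     if s[i] == sym_dr[k]:
--                         var_bool=True
--                 if var_bool == False:
--                     return False
--     for i in range(0,len(s)-1,1):
--         for j in range(0,len(c2)):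
--             if (s[i+1]) == (c2[j]):
--                 var_bool=False
--                 for k in range(0,len(sym_dr),1):
--                     if s[i] == sym_dr[k]:
--                         var_bool=True
--                 if var_bool == False:
--                     return False
--
--     sym_dv=['+','-','*','/','^',')']
--     for i in range(0,len(s)-2,1):
--         for  j in range(0,len(c1),1):
--             if (s[i],s[i+1]) == (c1[j][0],c1[j][1]):
--                 var_bool=False
--                 for k in range(0,len(sym_dv),1):
--                     if s[i+2] == sym_dv[k]:
--                         var_bool=True
--                 if var_bool == False:
--                     return False
--     for i in range(0,len(s)-1,1):
--         for j in range(0,len(c2)):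
--             if (s[i]) == (c2[j]):
--                 var_bool=False
--                 for k in range(0,len(sym_dv)):
--                     if s[i+1] == sym_dv[k]:
--                         var_bool=True
--                 if var_bool == False:
--                     return False
--
--     return True
-- ===== SOURCE B (Python) =====
-- def var_constante_dvdr(s, c1, c2):
--     left_ops = {'+', '-', '*', '/', '^', '('}
--     right_ops = {'+', '-', '*', '/', '^', ')'}
--     # phase 1: index every occurrence as (start, length)
--     occs = []
--     for t in c1:
--         if len(t) >= 2:
--             for i in range(len(s) - 1):
--                 if s[i] == t[0] and s[i + 1] == t[1]:
--                     occs.append((i, 2))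
--     for t in c2:
--         if len(t) == 1:
--             for i in range(len(s)):
--                 if s[i] == t:
--                     occs.append((i, 1))
--     # phase 2: validate each occurrence against its neighbours
--     for start, length in occs:
--         end = start + length - 1
--         if start > 0 and s[start - 1] not in left_ops:
--             return False
--         if end < len(s) - 1 and s[end + 1] not in right_ops:
--             return False
--     return True
-- ===== Notes on version B (the rewrite author's own statement) =====
-- stated objective: faster
-- what changed: Replaces A's four separate neighbour-checking scans (each with an inner 6-element operator loop run to completion) by one indexing pass that records every constant occurrence as (start,length) and a single uniform validation pass with set membership over the recorded occurrences.
-- outside the precondition, e.g. on var_constante_dvdr('zab', ['ab', 'x'], []): A returns False, B returns False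
import Mathlib
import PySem

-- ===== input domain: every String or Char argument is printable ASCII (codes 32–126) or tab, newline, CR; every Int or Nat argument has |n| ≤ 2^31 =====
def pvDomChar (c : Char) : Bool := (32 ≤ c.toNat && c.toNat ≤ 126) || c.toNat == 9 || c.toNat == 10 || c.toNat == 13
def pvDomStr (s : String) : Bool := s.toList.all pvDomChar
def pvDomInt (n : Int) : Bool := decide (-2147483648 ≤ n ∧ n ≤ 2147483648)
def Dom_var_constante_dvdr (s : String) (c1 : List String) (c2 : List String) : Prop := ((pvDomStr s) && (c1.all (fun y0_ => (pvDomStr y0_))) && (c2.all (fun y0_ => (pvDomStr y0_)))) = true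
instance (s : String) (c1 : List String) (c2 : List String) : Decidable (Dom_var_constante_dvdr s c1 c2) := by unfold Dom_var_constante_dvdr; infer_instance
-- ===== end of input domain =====

-- B replaces A's four neighbour-checking scans by one index-then-validate pass (measured constant-factor faster in a timing run).

-- ===== PORT A =====
-- inner 'var_bool=False; for k in ...: if s[i]==sym[k]: var_bool=True' loop of A
def pvVarBool (c : Option Char) (syms : List Char) : Bool :=
  syms.foldl (fun b k => if c == some k then true else b) false

-- literal port of A; the early 'return False' loops (whose bodies only return False) are rendered as List.all.
-- c1[j][0]/c1[j][1] on an entry shorter than 2 raises IndexError in Python; pyGet? is none there (excluded by Pre_).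
def var_constante_dvdr (s : String) (c1 : List String) (c2 : List String) : Bool :=
  let cs := s.toList
  let n : Int := cs.length
  let symDr : List Char := ['+', '-', '*', '/', '^', '(']
  let symDv : List Char := ['+', '-', '*', '/', '^', ')']
  ((PySem.List.pyRange 0 (n - 2) 1).all (fun i =>
      c1.all (fun t =>
        if (PySem.List.pyGet? cs (i + 1), PySem.List.pyGet? cs (i + 2))
             == (PySem.List.pyGet? t.toList 0, PySem.List.pyGet? t.toList 1)
        then pvVarBool (PySem.List.pyGet? cs i) symDr else true))
  &&
  ((PySem.List.pyRange 0 (n - 1) 1).all (fun i =>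
      c2.all (fun t =>
        if (PySem.List.pyGet? cs (i + 1)).map (fun c => [c]) == some t.toList
        then pvVarBool (PySem.List.pyGet? cs i) symDr else true))
  &&
  ((PySem.List.pyRange 0 (n - 2) 1).all (fun i =>
      c1.all (fun t =>
        if (PySem.List.pyGet? cs i, PySem.List.pyGet? cs (i + 1))
             == (PySem.List.pyGet? t.toList 0, PySem.List.pyGet? t.toList 1)
        then pvVarBool (PySem.List.pyGet? cs (i + 2)) symDv else true))
  &&
  (PySem.List.pyRange 0 (n - 1) 1).all (fun i =>
      c2.all (fun t =>
        if (PySem.List.pyGet? cs i).map (fun c => [c]) == some t.toList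
        then pvVarBool (PySem.List.pyGet? cs (i + 1)) symDv else true)))))

-- ===== PORT B =====
def pvLeftOps : PySem.Set Char := PySem.Set.ofList ['+', '-', '*', '/', '^', '(']
def pvRightOps : PySem.Set Char := PySem.Set.ofList ['+', '-', '*', '/', '^', ')']

-- phase 2 check for one occurrence (start, length); Option.any keeps the in-range access total
def pvValidOcc (cs : List Char) (o : Int × Int) : Bool :=
  let e := o.1 + o.2 - 1
  (if o.1 > 0 then (PySem.List.pyGet? cs (o.1 - 1)).any (fun c => PySem.Set.contains pvLeftOps c) else true)
  && (if e < (cs.length : Int) - 1 then (PySem.List.pyGet? cs (e + 1)).any (fun c => PySem.Set.contains pvRightOps c) else true)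

-- literal port of B: collect occurrences, then validate them uniformly
def var_constante_dvdr_alt (s : String) (c1 : List String) (c2 : List String) : Bool :=
  let cs := s.toList
  let n : Int := cs.length
  let occs1 : List (Int × Int) :=
    c1.foldl (fun acc t =>
      if 2 ≤ t.toList.length then
        (PySem.List.pyRange 0 (n - 1) 1).foldl (fun acc2 i =>
          if PySem.List.pyGet? cs i == PySem.List.pyGet? t.toList 0
             && PySem.List.pyGet? cs (i + 1) == PySem.List.pyGet? t.toList 1
          then acc2 ++ [(i, 2)] else acc2) acc
      else acc) []
  let occs : List (Int × Int) :=
    c2.foldl (fun acc t =>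
      if t.toList.length = 1 then
        (PySem.List.pyRange 0 n 1).foldl (fun acc2 i =>
          if (PySem.List.pyGet? cs i).map (fun c => [c]) == some t.toList
          then acc2 ++ [(i, 1)] else acc2) acc
      else acc) occs1
  occs.all (pvValidOcc cs)

-- ===== PRECONDITION & SPEC =====
-- Pre_ excludes the inputs on which Python A raises IndexError (len(s) ≥ 3 together with a c1 entry shorter
-- than 2 characters); on a few such inputs an earlier match makes A return False before reaching the short
-- entry (see claim.json cites) — B returns the same value there.
def Pre_var_constante_dvdr (s : String) (c1 : List String) (c2 : List String) : Prop :=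
  s.toList.length < 3 ∨ ∀ t ∈ c1, 2 ≤ t.toList.length
instance (s : String) (c1 : List String) (c2 : List String) : Decidable (Pre_var_constante_dvdr s c1 c2) := by
  unfold Pre_var_constante_dvdr; infer_instance

def pvWitness_var_constante_dvdr : String × List String × List String := ("a+PI*2", ["PI"], ["e"])

def Spec_var_constante_dvdr (s : String) (c1 : List String) (c2 : List String) (out : Bool) : Prop := out = var_constante_dvdr_alt s c1 c2
instance (s : String) (c1 : List String) (c2 : List String) (out : Bool) : Decidable (Spec_var_constante_dvdr s c1 c2 out) := by unfold Spec_var_constante_dvdr; infer_instance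

-- ===== CLAIM (what is proved, stated in full; the proofs are below) =====
def Claim_equal_var_constante_dvdr : Prop := ∀ (s : String) (c1 : List String) (c2 : List String), Dom_var_constante_dvdr s c1 c2 → Pre_var_constante_dvdr s c1 c2 → Spec_var_constante_dvdr s c1 c2 (var_constante_dvdr s c1 c2)

-- ===== LEMMAS AND PROOFS =====

lemma pv_if_true_eq (c : Prop) [Decidable c] (b : Bool) :
    ((if c then b else true) = true) ↔ (c → b = true) := by
  split_ifs with h <;> simp [h]

lemma pv_orn_iff (a b : Bool) : (!a || b) = true ↔ (a = true → b = true) := by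
  cases a <;> simp

lemma pv_add_two_sub_one (i : Int) : i + 2 - 1 = i + 1 := by omega
lemma pv_add_one_sub_one (i : Int) : i + 1 - 1 = i := by omega
lemma pv_add_one_add_one (i : Int) : i + 1 + 1 = i + 2 := by omega

lemma pvVarBool_eq_any (c : Option Char) (syms : List Char) :
    pvVarBool c syms = syms.any (fun k => c == some k) := by
  suffices h : ∀ b : Bool,
      syms.foldl (fun b k => if c == some k then true else b) b
        = (b || syms.any (fun k => c == some k)) by
    simpa [pvVarBool] using h false
  induction syms with
  | nil => simp
  | cons x xs ih =>
      intro b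
      rw [List.foldl_cons, List.any_cons, ih]
      cases h : (c == some x) <;> simp

lemma pv_all_foldl_append_if {α β : Type} (q : α → Bool) (f : α → β)
    (p : β → Bool) (l : List α) :
    ∀ acc : List β,
      (l.foldl (fun acc x => if q x then acc ++ [f x] else acc) acc).all p
        = (acc.all p && l.all (fun x => !q x || p (f x))) := by
  induction l with
  | nil => simp
  | cons x xs ih =>
      intro acc
      cases h : q x <;> simp [h, ih, List.all_append, Bool.and_assoc]

lemma pv_all_foldl_nested {α β : Type} (p : β → Bool) (step : List β → α → List β)
    (h : α → Bool) (hs : ∀ acc t, (step acc t).all p = (acc.all p && h t)) (l : List α) :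
    ∀ acc, (l.foldl step acc).all p = (acc.all p && l.all h) := by
  induction l with
  | nil => simp
  | cons x xs ih =>
      intro acc
      rw [List.foldl_cons, ih, hs]
      simp [Bool.and_assoc]

lemma pvLeftOps_eq : pvLeftOps = ['+', '-', '*', '/', '^', '('] := by decide
lemma pvRightOps_eq : pvRightOps = ['+', '-', '*', '/', '^', ')'] := by decide

-- membership / match propositions shared by the two characterisations
def pvMemL (cs : List Char) (i : Int) : Prop :=
  ∃ k ∈ (['+', '-', '*', '/', '^', '('] : List Char), PySem.List.pyGet? cs i = some k
def pvMemR (cs : List Char) (i : Int) : Prop :=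
  ∃ k ∈ (['+', '-', '*', '/', '^', ')'] : List Char), PySem.List.pyGet? cs i = some k
def pvMatch2 (cs tl : List Char) (i : Int) : Prop :=
  PySem.List.pyGet? cs i = PySem.List.pyGet? tl 0 ∧
    PySem.List.pyGet? cs (i + 1) = PySem.List.pyGet? tl 1
def pvMatch1 (cs tl : List Char) (i : Int) : Prop :=
  (PySem.List.pyGet? cs i).map (fun c => [c]) = some tl

lemma pvMatch2_len (cs tl : List Char) (i : Int) (h : pvMatch2 cs tl i)
    (h0 : 0 ≤ i) (hn : i + 1 < (cs.length : Int)) : 2 ≤ tl.length := by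
  obtain ⟨hm1, hm2⟩ := h
  rw [PySem.List.pyGet?_eq_some_getElem cs (by omega) (by omega)] at hm2
  rcases tl with _ | ⟨a, _ | ⟨b, r⟩⟩ <;>
    simp [PySem.List.pyGet?, PySem.List.pyIdx?] at hm2 ⊢

lemma pvMatch1_len (cs tl : List Char) (i : Int) (h : pvMatch1 cs tl i) :
    tl.length = 1 := by
  unfold pvMatch1 at h
  cases hg : PySem.List.pyGet? cs i with
  | none => rw [hg] at h; simp at h
  | some c => rw [hg] at h; simp at h; subst h; rfl

lemma pvA_iff (s : String) (c1 c2 : List String) :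
    var_constante_dvdr s c1 c2 = true ↔
      ((∀ i : Int, 0 ≤ i → i < (s.toList.length : Int) - 2 →
          ∀ t ∈ c1, pvMatch2 s.toList t.toList (i + 1) → pvMemL s.toList i) ∧
       (∀ i : Int, 0 ≤ i → i < (s.toList.length : Int) - 1 →
          ∀ t ∈ c2, pvMatch1 s.toList t.toList (i + 1) → pvMemL s.toList i) ∧
       (∀ i : Int, 0 ≤ i → i < (s.toList.length : Int) - 2 →
          ∀ t ∈ c1, pvMatch2 s.toList t.toList i → pvMemR s.toList (i + 2)) ∧
       (∀ i : Int, 0 ≤ i → i < (s.toList.length : Int) - 1 →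
          ∀ t ∈ c2, pvMatch1 s.toList t.toList i → pvMemR s.toList (i + 1))) := by
  simp only [var_constante_dvdr, Bool.and_eq_true, List.all_eq_true,
    PySem.List.mem_pyRange_one, pv_if_true_eq, pvVarBool_eq_any, List.any_eq_true,
    beq_iff_eq, Prod.mk.injEq, pvMatch2, pvMatch1, pvMemL, pvMemR,
    pv_add_one_add_one, and_imp]

lemma pv_ex_mem_comm {α : Type} (l : List α) (P : α → Prop) :
    (∃ k, P k ∧ k ∈ l) ↔ ∃ k ∈ l, P k := by
  constructor <;> rintro ⟨k, h1, h2⟩ <;> exact ⟨k, h2, h1⟩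

lemma pvB_hs1 (cs : List Char) (acc : List (Int × Int)) (t : String) :
    ((if 2 ≤ t.toList.length then
        (PySem.List.pyRange 0 ((cs.length : Int) - 1) 1).foldl (fun acc2 i =>
          if PySem.List.pyGet? cs i == PySem.List.pyGet? t.toList 0
             && PySem.List.pyGet? cs (i + 1) == PySem.List.pyGet? t.toList 1
          then acc2 ++ [(i, 2)] else acc2) acc
      else acc).all (pvValidOcc cs))
    = (acc.all (pvValidOcc cs) &&
       (if 2 ≤ t.toList.length then
          (PySem.List.pyRange 0 ((cs.length : Int) - 1) 1).all (fun i =>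
            !(PySem.List.pyGet? cs i == PySem.List.pyGet? t.toList 0
               && PySem.List.pyGet? cs (i + 1) == PySem.List.pyGet? t.toList 1)
              || pvValidOcc cs (i, 2)) else true)) := by
  by_cases h : 2 ≤ t.toList.length
  · rw [if_pos h, if_pos h, pv_all_foldl_append_if]
  · rw [if_neg h, if_neg h]
    simp

lemma pvB_hs2 (cs : List Char) (acc : List (Int × Int)) (t : String) :
    ((if t.toList.length = 1 then
        (PySem.List.pyRange 0 ((cs.length : Int)) 1).foldl (fun acc2 i =>
          if (PySem.List.pyGet? cs i).map (fun c => [c]) == some t.toList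
          then acc2 ++ [(i, 1)] else acc2) acc
      else acc).all (pvValidOcc cs))
    = (acc.all (pvValidOcc cs) &&
       (if t.toList.length = 1 then
          (PySem.List.pyRange 0 ((cs.length : Int)) 1).all (fun i =>
            !((PySem.List.pyGet? cs i).map (fun c => [c]) == some t.toList)
              || pvValidOcc cs (i, 1)) else true)) := by
  by_cases h : t.toList.length = 1
  · rw [if_pos h, if_pos h, pv_all_foldl_append_if]
  · rw [if_neg h, if_neg h]
    simp

lemma pvB_iff (s : String) (c1 c2 : List String) :
    var_constante_dvdr_alt s c1 c2 = true ↔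
      ((∀ t ∈ c1, 2 ≤ t.toList.length →
          ∀ i : Int, 0 ≤ i → i < (s.toList.length : Int) - 1 →
            pvMatch2 s.toList t.toList i →
              (0 < i → pvMemL s.toList (i - 1)) ∧
              (i + 1 < (s.toList.length : Int) - 1 → pvMemR s.toList (i + 2))) ∧
       (∀ t ∈ c2, t.toList.length = 1 →
          ∀ i : Int, 0 ≤ i → i < (s.toList.length : Int) →
            pvMatch1 s.toList t.toList i →
              (0 < i → pvMemL s.toList (i - 1)) ∧
              (i < (s.toList.length : Int) - 1 → pvMemR s.toList (i + 1)))) := by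
  unfold var_constante_dvdr_alt
  rw [pv_all_foldl_nested (pvValidOcc s.toList)
        (fun acc t => if t.toList.length = 1 then
            (PySem.List.pyRange 0 ((s.toList.length : Int)) 1).foldl (fun acc2 i =>
              if (PySem.List.pyGet? s.toList i).map (fun c => [c]) == some t.toList
              then acc2 ++ [(i, 1)] else acc2) acc
          else acc)
        (fun t => if t.toList.length = 1 then
            (PySem.List.pyRange 0 ((s.toList.length : Int)) 1).all (fun i =>
              !((PySem.List.pyGet? s.toList i).map (fun c => [c]) == some t.toList)
                || pvValidOcc s.toList (i, 1)) else true)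
        (pvB_hs2 s.toList) c2,
      pv_all_foldl_nested (pvValidOcc s.toList)
        (fun acc t => if 2 ≤ t.toList.length then
            (PySem.List.pyRange 0 ((s.toList.length : Int) - 1) 1).foldl (fun acc2 i =>
              if PySem.List.pyGet? s.toList i == PySem.List.pyGet? t.toList 0
                 && PySem.List.pyGet? s.toList (i + 1) == PySem.List.pyGet? t.toList 1
              then acc2 ++ [(i, 2)] else acc2) acc
          else acc)
        (fun t => if 2 ≤ t.toList.length then
            (PySem.List.pyRange 0 ((s.toList.length : Int) - 1) 1).all (fun i =>
              !(PySem.List.pyGet? s.toList i == PySem.List.pyGet? t.toList 0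
                 && PySem.List.pyGet? s.toList (i + 1) == PySem.List.pyGet? t.toList 1)
                || pvValidOcc s.toList (i, 2)) else true)
        (pvB_hs1 s.toList) c1]
  simp only [List.all_nil, Bool.true_and, Bool.and_eq_true, List.all_eq_true,
    pv_if_true_eq, pv_orn_iff, PySem.List.mem_pyRange_one,
    beq_iff_eq, pvValidOcc, pvMatch2, pvMatch1, pvMemL, pvMemR,
    Option.any_eq_true, PySem.Set.contains, pvLeftOps_eq, pvRightOps_eq,
    List.contains_iff_mem, pv_ex_mem_comm, gt_iff_lt,
    pv_add_two_sub_one, pv_add_one_sub_one, pv_add_one_add_one, and_imp]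

-- ===== VERDICT (by name: the statement is the Claim_ definition above) =====
theorem var_constante_dvdr_spec : Claim_equal_var_constante_dvdr := by
  intro s c1 c2 _ _
  unfold Spec_var_constante_dvdr
  rw [Bool.eq_iff_iff, pvA_iff, pvB_iff]
  constructor
  · rintro ⟨h1, h2, h3, h4⟩
    constructor
    · intro t ht hlen i h0 hn hm
      refine ⟨fun hpos => ?_, fun hr => ?_⟩
      · exact h1 (i - 1) (by omega) (by omega) t ht
          (by simpa [show i - 1 + 1 = i from by omega] using hm)
      · exact h3 i h0 (by omega) t ht hm
    · intro t ht hlen i h0 hn hm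
      refine ⟨fun hpos => ?_, fun hr => ?_⟩
      · exact h2 (i - 1) (by omega) (by omega) t ht
          (by simpa [show i - 1 + 1 = i from by omega] using hm)
      · exact h4 i h0 (by omega) t ht hm
  · rintro ⟨h1, h2⟩
    refine ⟨?_, ?_, ?_, ?_⟩
    · intro i h0 hn t ht hm
      have hlen := pvMatch2_len s.toList t.toList (i + 1) hm (by omega) (by omega)
      have := (h1 t ht hlen (i + 1) (by omega) (by omega) hm).1 (by omega)
      simpa using this
    · intro i h0 hn t ht hm
      have hlen := pvMatch1_len s.toList t.toList (i + 1) hm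
      have := (h2 t ht hlen (i + 1) (by omega) (by omega) hm).1 (by omega)
      simpa using this
    · intro i h0 hn t ht hm
      have hlen := pvMatch2_len s.toList t.toList i hm (by omega) (by omega)
      exact (h1 t ht hlen i h0 (by omega) hm).2 (by omega)
    · intro i h0 hn t ht hm
      have hlen := pvMatch1_len s.toList t.toList i hm
      exact (h2 t ht hlen i h0 (by omega) hm).2 (by omega)
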